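-- pv_equiv track=rewrite | github.com/bss-perseverantia/codeferno | bus/gen/gen.py | solve
-- ===== SOURCE A (Python) =====
-- from typing import List, Tuple
--
-- def solve(on: List[int], off: List[int], C: int, need_index: bool) -> str:
--     """Judge solution (reference). Off happens before on; boarding limited by C."""
--     cur = 0
--     best = 0
--     best_idx = 1
--     n = len(on)
--     for i in range(n):
--         # Off first (guaranteed valid by generator)
--         cur -= off[i]
--         if cur < 0:
--             # Should never happen if generator is correct
--             cur = 0
--         # On with capacity cap
--         space = C - cur
--         if space > 0:
--             take = min(space, on[i])
--             cur += take
--         # Track first occurrence of maximum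
--         if cur > best:
--             best = cur
--             best_idx = i + 1
--     return f"{best} {best_idx}" if need_index else f"{best}"
-- ===== SOURCE B (Python) =====
-- from typing import List
--
--
-- def solve(on: List[int], off: List[int], C: int, need_index: bool) -> str:
--     """Max of a lazy occupancy stream; if an index is needed, re-simulate to find
--     the first stop attaining the (positive) maximum."""
--     def occs():
--         cur = 0
--         for x, y in zip(on, off):
--             cur = max(0, cur - y)
--             if cur < C:
--                 cur = min(C, cur + x)
--             yield cur
--
--     best = max(occs(), default=0)
--     if best < 0:
--         best = 0
--     if not need_index:
--         return f"{best}"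
--     best_idx = 1
--     if best > 0:
--         for i, c in enumerate(occs()):
--             if c == best:
--                 best_idx = i + 1
--                 break
--     return f"{best} {best_idx}"
-- ===== Notes on version B (the rewrite author's own statement) =====
-- stated objective: alternative
-- what changed: A fuses simulation with running-max-and-index tracking in one loop; B computes the maximum occupancy with builtin max over a lazily generated occupancy stream (no stored list, no index tracking) and, only when an index is needed and the max is positive, re-runs the simulation stopping at the first stop attaining it.
import Mathlib
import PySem

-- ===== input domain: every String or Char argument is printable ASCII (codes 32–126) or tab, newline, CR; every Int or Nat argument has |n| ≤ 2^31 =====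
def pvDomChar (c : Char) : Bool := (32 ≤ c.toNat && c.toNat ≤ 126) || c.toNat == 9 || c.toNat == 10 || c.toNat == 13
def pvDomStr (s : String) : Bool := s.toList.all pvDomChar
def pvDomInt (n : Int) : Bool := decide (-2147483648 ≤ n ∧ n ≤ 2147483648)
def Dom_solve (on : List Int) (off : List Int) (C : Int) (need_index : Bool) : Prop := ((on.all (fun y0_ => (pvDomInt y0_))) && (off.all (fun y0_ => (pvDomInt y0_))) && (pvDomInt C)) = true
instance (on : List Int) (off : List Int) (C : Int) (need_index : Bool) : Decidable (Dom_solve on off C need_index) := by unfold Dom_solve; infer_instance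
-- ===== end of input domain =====

-- B finds the maximum occupancy with builtin max over a generated occupancy stream and,
-- only when an index is needed and the max is positive, re-simulates to find the first
-- stop attaining it; same return value as A on Pre_; no speed claim.

-- ===== PORT A =====
def solve (on : List Int) (off : List Int) (C : Int) (need_index : Bool) : String :=
  let n : Int := PySem.List.len on
  let st := (PySem.List.pyRange 0 n 1).foldl (fun (st : Int × Int × Int) i =>
      let cur := st.1 - PySem.List.pyGetD off i 0
      let cur := if cur < 0 then 0 else cur
      let space := C - cur
      let cur := if space > 0 then cur + min space (PySem.List.pyGetD on i 0) else cur
      if cur > st.2.1 then (cur, cur, i + 1) else (cur, st.2.1, st.2.2)) (0, 0, 1)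
  if need_index then PySem.Int.toStr st.2.1 ++ " " ++ PySem.Int.toStr st.2.2
  else PySem.Int.toStr st.2.1

-- ===== PORT B =====
-- one step of Source B's occs() generator body
def pvStep (C cur x y : Int) : Int :=
  let c := max 0 (cur - y)
  if c < C then min C (c + x) else c

-- the occupancy stream of occs(): thread cur through zip(on, off)
def pvOccs (C : Int) (cur : Int) : List (Int × Int) → List Int
  | [] => []
  | (x, y) :: rest => pvStep C cur x y :: pvOccs C (pvStep C cur x y) rest

-- Source B's second loop: re-simulate, return i+1 at the first occupancy equal to best (else the initial 1)
def pvFind (C best : Int) : List (Int × Int) → Int → Int → Int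
  | [], _, _ => 1
  | (x, y) :: rest, cur, i =>
      let c := pvStep C cur x y
      if c = best then i + 1 else pvFind C best rest c (i + 1)

def solve_alt (on : List Int) (off : List Int) (C : Int) (need_index : Bool) : String :=
  let best0 := PySem.List.maxD (pvOccs C 0 (on.zip off)) (fun v => v) 0
  let best := if best0 < 0 then 0 else best0
  if !need_index then PySem.Int.toStr best
  else
    let best_idx : Int := if best > 0 then pvFind C best (on.zip off) 0 0 else 1
    PySem.Int.toStr best ++ " " ++ PySem.Int.toStr best_idx

-- ===== PRECONDITION & SPEC =====
-- Pre_ excludes exactly the inputs where A raises IndexError reading off[i] (off shorter than on).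
def Pre_solve (on : List Int) (off : List Int) (C : Int) (need_index : Bool) : Prop :=
  on.length ≤ off.length
instance (on : List Int) (off : List Int) (C : Int) (need_index : Bool) : Decidable (Pre_solve on off C need_index) := by unfold Pre_solve; infer_instance
def pvWitness_solve : List Int × List Int × Int × Bool := ([3, 2, 5], [0, 1, 4], 4, true)

def Spec_solve (on : List Int) (off : List Int) (C : Int) (need_index : Bool) (out : String) : Prop := out = solve_alt on off C need_index
instance (on : List Int) (off : List Int) (C : Int) (need_index : Bool) (out : String) : Decidable (Spec_solve on off C need_index out) := by unfold Spec_solve; infer_instance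

-- ===== CLAIM (what is proved, stated in full; the proofs are below) =====
def Claim_equal_solve : Prop := ∀ (on : List Int) (off : List Int) (C : Int) (need_index : Bool), Dom_solve on off C need_index → Pre_solve on off C need_index → Spec_solve on off C need_index (solve on off C need_index)

-- ===== LEMMAS AND PROOFS =====

-- A's loop body, on an enumerated (index, (on_i, off_i)) element
def pvStepA (C : Int) (st : Int × Int × Int) (e : Int × Int × Int) : Int × Int × Int :=
  let cur := pvStep C st.1 e.2.1 e.2.2
  if cur > st.2.1 then (cur, cur, e.1 + 1) else (cur, st.2.1, st.2.2)

-- A's running (best, best_idx) tracking over an occupancy list, i = 1-based index of the next element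
def pvSel : List Int → Int → Int → Int → Int × Int
  | [], best, bidx, _ => (best, bidx)
  | c :: o, best, bidx, i =>
      pvSel o (if c > best then c else best) (if c > best then i else bidx) (i + 1)

theorem pvSel_eq (o : List Int) : ∀ (best bidx i : Int),
    pvSel o best bidx i =
      if o.foldl max best ≤ best then (best, bidx)
      else (o.foldl max best, i + ((PySem.List.index? o (o.foldl max best)).getD 0 : Nat)) := by
  induction o with
  | nil => intro best bidx i; simp [pvSel]
  | cons c t ih =>
    intro best bidx i
    by_cases hc : c > best
    · have hMc := (PySem.List.le_foldl_max t c).1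
      simp only [pvSel, if_pos hc]
      rw [ih]
      have hRL : List.foldl max best (c :: t) = List.foldl max c t := by
        have : max best c = c := by omega
        simp [List.foldl, this]
      rw [hRL, if_neg (by omega : ¬ List.foldl max c t ≤ best)]
      by_cases heq : List.foldl max c t ≤ c
      · have he : List.foldl max c t = c := le_antisymm heq hMc
        rw [if_pos heq, he, PySem.List.index?_cons_self]
        simp
      · rw [if_neg heq]
        have hne : c ≠ List.foldl max c t := by omega
        have hmem : List.foldl max c t ∈ t := by
          rcases PySem.List.foldl_max_mem t c with h | h
          · omega
          · exact h
        rw [PySem.List.index?_cons_of_ne t hne]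
        rcases hk : PySem.List.index? t (List.foldl max c t) with _ | k
        · exact absurd ((PySem.List.index?_eq_none_iff t _).1 hk) (by simpa using hmem)
        · simp only [Option.map_some, Option.getD_some, Prod.mk.injEq, true_and]
          push_cast; ring
    · simp only [pvSel, if_neg hc]
      rw [ih]
      have hRL : List.foldl max best (c :: t) = List.foldl max best t := by
        have : max best c = best := by omega
        simp [List.foldl, this]
      rw [hRL]
      by_cases hle : List.foldl max best t ≤ best
      · rw [if_pos hle, if_pos hle]
      · rw [if_neg hle, if_neg hle]
        have hMb := (PySem.List.le_foldl_max t best).1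
        have hne : c ≠ List.foldl max best t := by omega
        have hmem : List.foldl max best t ∈ t := by
          rcases PySem.List.foldl_max_mem t best with h | h
          · omega
          · exact h
        rw [PySem.List.index?_cons_of_ne t hne]
        rcases hk : PySem.List.index? t (List.foldl max best t) with _ | k
        · exact absurd ((PySem.List.index?_eq_none_iff t _).1 hk) (by simpa using hmem)
        · simp only [Option.map_some, Option.getD_some, Prod.mk.injEq, true_and]
          push_cast; ring

theorem pv_foldl_max_max (l : List Int) (a b : Int) :
    l.foldl max (max a b) = max a (l.foldl max b) := by
  induction l generalizing b with
  | nil => rfl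
  | cons c t ih => simpa [max_assoc] using ih (max b c)

-- A's tracking over a list equals max(default 0) + first-index selection
theorem pvSel_sel (o : List Int) :
    pvSel o 0 1 1 =
      (if PySem.List.maxD o (fun v => v) 0 ≤ 0 then ((0 : Int), (1 : Int))
       else (PySem.List.maxD o (fun v => v) 0,
             (((PySem.List.index? o (PySem.List.maxD o (fun v => v) 0)).getD 0 : Nat) : Int) + 1)) := by
  rcases o with _ | ⟨h, t⟩
  · decide
  · rw [pvSel_eq]
    have hmax : PySem.List.maxD (h :: t) (fun v => v) 0 = t.foldl max h := by
      simp [PySem.List.maxD, PySem.List.max?_id_cons]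
    have hM : (h :: t).foldl max 0 = max 0 (t.foldl max h) := by
      simpa [List.foldl] using pv_foldl_max_max t 0 h
    rw [hmax, hM]
    by_cases hle : t.foldl max h ≤ 0
    · rw [if_pos (by omega : max 0 (t.foldl max h) ≤ 0), if_pos hle]
    · rw [if_neg (by omega : ¬ max 0 (t.foldl max h) ≤ 0), if_neg hle,
          (by omega : max 0 (t.foldl max h) = t.foldl max h)]
      simp only [Prod.mk.injEq, true_and]
      ring

theorem pv_enum_fold (C : Int) (l : List (Int × Int)) : ∀ (cur best bidx s : Int),
    ((PySem.List.enumerate l s).foldl (pvStepA C) (cur, best, bidx)).2 =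
      pvSel (pvOccs C cur l) best bidx (s + 1) := by
  induction l with
  | nil => intro cur best bidx s; simp [PySem.List.enumerate, pvOccs, pvSel]
  | cons p t ih =>
    intro cur best bidx s
    obtain ⟨x, y⟩ := p
    simp only [PySem.List.enumerate, List.foldl, pvOccs, pvSel]
    rw [show pvStepA C (cur, best, bidx) (s, x, y)
          = (pvStep C cur x y, (if pvStep C cur x y > best then pvStep C cur x y else best),
             (if pvStep C cur x y > best then s + 1 else bidx)) from by
        simp only [pvStepA]; split_ifs <;> rfl]
    exact ih _ _ _ _

-- pvFind computes 1 + the first index of best in the occupancy stream (or the initial 1)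
theorem pvFind_eq (C best : Int) (l : List (Int × Int)) : ∀ (cur i : Int),
    pvFind C best l cur i =
      match PySem.List.index? (pvOccs C cur l) best with
      | none => 1
      | some k => i + (k : Int) + 1 := by
  induction l with
  | nil => intro cur i; simp [pvFind, pvOccs, PySem.List.index?]
  | cons p t ih =>
    intro cur i
    obtain ⟨x, y⟩ := p
    simp only [pvFind, pvOccs]
    by_cases hc : pvStep C cur x y = best
    · rw [if_pos hc, hc, PySem.List.index?_cons_self]
      simp
    · rw [if_neg hc, ih, PySem.List.index?_cons_of_ne (pvOccs C (pvStep C cur x y) t) hc]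
      rcases PySem.List.index? (pvOccs C (pvStep C cur x y) t) best with _ | k
      · rfl
      · simp only [Option.map_some]
        push_cast; ring_nf

-- when the max (default 0) is positive, it is a member of the list
theorem pv_maxD_mem (o : List Int) (h : ¬ PySem.List.maxD o (fun v => v) 0 ≤ 0) :
    PySem.List.maxD o (fun v => v) 0 ∈ o := by
  rcases o with _ | ⟨a, t⟩
  · simp [PySem.List.maxD, PySem.List.max?] at h
  · have hmax : PySem.List.maxD (a :: t) (fun v => v) 0 = t.foldl max a := by
      simp [PySem.List.maxD, PySem.List.max?_id_cons]
    rw [hmax]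
    rcases PySem.List.foldl_max_mem t a with h' | h'
    · rw [h']; exact List.mem_cons_self
    · exact List.mem_cons_of_mem a h'

-- ===== VERDICT (by name: the statement is the Claim_ definition above) =====
theorem solve_spec : Claim_equal_solve := by
  intro on off C need_index _hdom hpre
  unfold Pre_solve at hpre
  unfold Spec_solve
  simp only [solve, solve_alt]
  have hlen : (on.zip off).length = on.length := by
    simp [List.length_zip]; omega
  have hbody : ∀ (st : Int × Int × Int), ∀ i ∈ PySem.List.pyRange 0 (PySem.List.len on) 1,
      (fun (st : Int × Int × Int) i =>
        let cur := st.1 - PySem.List.pyGetD off i 0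
        let cur := if cur < 0 then 0 else cur
        let space := C - cur
        let cur := if space > 0 then cur + min space (PySem.List.pyGetD on i 0) else cur
        if cur > st.2.1 then (cur, cur, i + 1) else (cur, st.2.1, st.2.2)) st i
      = pvStepA C st (i, PySem.List.pyGetD (on.zip off) i (0, 0)) := by
    intro st i hi
    have hi' := (PySem.List.mem_pyRange_one).1 hi
    simp only [PySem.List.len_eq] at hi'
    have h0 : 0 ≤ i := hi'.1
    have h1 : i < ((on.zip off).length : Int) := by rw [hlen]; exact_mod_cast hi'.2
    have h1on : i < (on.length : Int) := hi'.2
    have h1off : i < (off.length : Int) := by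
      exact lt_of_lt_of_le h1on (by exact_mod_cast hpre)
    show (let cur := st.1 - PySem.List.pyGetD off i 0
          let cur := if cur < 0 then 0 else cur
          let space := C - cur
          let cur := if space > 0 then cur + min space (PySem.List.pyGetD on i 0) else cur
          if cur > st.2.1 then (cur, cur, i + 1) else (cur, st.2.1, st.2.2))
        = pvStepA C st (i, PySem.List.pyGetD (on.zip off) i (0, 0))
    rw [PySem.List.pyGetD_eq_getElem (on.zip off) (0, 0) h0 h1,
        PySem.List.pyGetD_eq_getElem on 0 h0 h1on,
        PySem.List.pyGetD_eq_getElem off 0 h0 h1off]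
    simp only [List.getElem_zip, pvStepA, pvStep]
    have hstep : (let c := if st.1 - off[i.toNat] < 0 then 0 else st.1 - off[i.toNat]
                  if C - c > 0 then c + min (C - c) on[i.toNat] else c)
        = (let c := max 0 (st.1 - off[i.toNat])
           if c < C then min C (c + on[i.toNat]) else c) := by
      simp only []
      split_ifs <;> omega
    simp only [] at hstep ⊢
    rw [hstep]
  rw [PySem.List.foldl_congr_mem _ _ _ _ hbody]
  rw [show PySem.List.pyRange 0 (PySem.List.len on) 1
        = PySem.List.pyRange 0 (PySem.List.len (on.zip off)) 1 from by
      simp [PySem.List.len_eq, hlen]]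
  rw [show ((PySem.List.pyRange 0 (PySem.List.len (on.zip off)) 1).foldl
         (fun st i => pvStepA C st (i, PySem.List.pyGetD (on.zip off) i (0, 0))) (0, 0, 1))
       = ((PySem.List.pyRange 0 (PySem.List.len (on.zip off)) 1).map
           (fun j => (j, PySem.List.pyGetD (on.zip off) j (0, 0)))).foldl (pvStepA C) (0, 0, 1) from
        List.foldl_map.symm,
      ← PySem.List.enumerate_eq_map_pyRange (on.zip off) (0, 0)]
  rw [show ((PySem.List.enumerate (on.zip off) 0).foldl (pvStepA C) (0, 0, 1)).2
        = pvSel (pvOccs C 0 (on.zip off)) 0 1 1 from pv_enum_fold C (on.zip off) 0 0 1 0]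
  rw [pvSel_sel]
  set o := pvOccs C 0 (on.zip off) with ho
  set m := PySem.List.maxD o (fun v => v) 0 with hm
  by_cases hle : m ≤ 0
  · rw [if_pos hle]
    have hb : (if m < 0 then (0 : Int) else m) = 0 := by split_ifs <;> omega
    cases need_index <;> simp [hb]
  · rw [if_neg hle]
    have hbm : (if m < 0 then (0 : Int) else m) = m := by rw [if_neg (by omega)]
    have hmem : m ∈ o := pv_maxD_mem o hle
    rcases hk : PySem.List.index? o m with _ | k
    · exact absurd ((PySem.List.index?_eq_none_iff o _).1 hk) (by simpa using hmem)
    · have hfind : pvFind C m (on.zip off) 0 0 = (k : Int) + 1 := by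
        rw [pvFind_eq, ← ho, hk]; push_cast; ring
      have hgt : m > 0 := by omega
      cases need_index <;> simp [hbm, hfind, hgt]
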